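-- pv_equiv track=rewrite | github.com/james5635/GeekForGeek-Data-Structure-and-Algorithm | hashing/hard/four_sum_four_arrays/solution.py | find_quadruples_four_arrays
-- ===== SOURCE A (Python) =====
-- from typing import List
-- from collections import defaultdict
--
-- def find_quadruples_four_arrays(
--     A: List[int], B: List[int], C: List[int], D: List[int]
-- ) -> List[List[int]]:
--     """
--     Find all quadruples from four arrays that sum to zero.
--
--     Time Complexity: O(n^2)
--     Space Complexity: O(n^2)
--
--     Returns:
--         List of all valid quadruples [A[i], B[j], C[k], D[l]]
--     """
--     n = len(A)
--     result = []
--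
--     # Hash map to store pairs from A and B indexed by their sum
--     sum_map = defaultdict(list)
--
--     # Store all pairs from A and B
--     for i in range(n):
--         for j in range(n):
--             pair_sum = A[i] + B[j]
--             sum_map[pair_sum].append((A[i], B[j]))
--
--     # For each pair in C and D, find complementary pairs
--     for k in range(n):
--         for l in range(n):
--             target = -(C[k] + D[l])
--             if target in sum_map:
--                 for pair in sum_map[target]:
--                     result.append([pair[0], pair[1], C[k], D[l]])
--
--     return result
-- ===== SOURCE B (Python) =====
-- from typing import List
--
--
-- def find_quadruples_four_arrays(
--     A: List[int], B: List[int], C: List[int], D: List[int]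
-- ) -> List[List[int]]:
--     """Brute force: no hash map, just four nested index loops.
--
--     Looping k, l outermost and i, j innermost yields the quadruples in the
--     same order as the pair-sum-map version: grouped by the (C[k], D[l]) pair,
--     then by (i, j) insertion order.
--     """
--     n = len(A)
--     result = []
--     for k in range(n):
--         for l in range(n):
--             for i in range(n):
--                 for j in range(n):
--                     if A[i] + B[j] + C[k] + D[l] == 0:
--                         result.append([A[i], B[j], C[k], D[l]])
--     return result
-- ===== Notes on version B (the rewrite author's own statement) =====
-- stated objective: simpler
-- what changed: Replaced the pair-sum hash map (build all A/B pair sums, then look up complements for each C/D pair) by a plain four-nested-loop brute force in order k,l,i,j, which produces the same output order with no auxiliary index.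
import Mathlib
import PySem

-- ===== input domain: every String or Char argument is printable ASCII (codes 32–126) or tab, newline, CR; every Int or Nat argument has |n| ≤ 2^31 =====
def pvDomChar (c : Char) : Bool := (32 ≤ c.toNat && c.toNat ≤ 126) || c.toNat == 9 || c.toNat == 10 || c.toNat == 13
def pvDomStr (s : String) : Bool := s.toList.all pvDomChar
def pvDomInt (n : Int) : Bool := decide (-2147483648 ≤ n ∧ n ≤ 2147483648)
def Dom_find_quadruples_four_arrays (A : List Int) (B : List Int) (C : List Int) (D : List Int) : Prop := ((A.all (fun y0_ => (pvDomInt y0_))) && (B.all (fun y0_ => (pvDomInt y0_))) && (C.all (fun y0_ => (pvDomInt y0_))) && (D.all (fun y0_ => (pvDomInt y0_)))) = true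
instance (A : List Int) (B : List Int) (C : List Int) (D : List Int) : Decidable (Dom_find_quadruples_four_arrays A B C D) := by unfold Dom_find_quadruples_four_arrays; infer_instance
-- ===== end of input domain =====

-- B replaces A's pair-sum hash map by a plain four-nested-loop brute force (order k,l,i,j),
-- same output, no auxiliary index; objective: simpler, not faster.

-- ===== PORT A =====
-- Literal port of A: build a defaultdict(list) of A/B pairs keyed by their sum,
-- then for each (C[k], D[l]) append the pairs stored under the complement.
-- (the Python locals n, ai, bj, ck, dl, target are written inline)
def pvSumMap (A : List Int) (B : List Int) : PySem.Dict Int (List (Int × Int)) :=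
  (PySem.List.pyRange 0 (A.length : Int) 1).foldl (fun d i =>
    (PySem.List.pyRange 0 (A.length : Int) 1).foldl (fun d j =>
      d.modify (PySem.List.pyGetD A i 0 + PySem.List.pyGetD B j 0) []
        (· ++ [(PySem.List.pyGetD A i 0, PySem.List.pyGetD B j 0)])) d)
    PySem.Dict.empty

def find_quadruples_four_arrays (A : List Int) (B : List Int) (C : List Int) (D : List Int) : List (List Int) :=
  (PySem.List.pyRange 0 (A.length : Int) 1).foldl (fun res k =>
    (PySem.List.pyRange 0 (A.length : Int) 1).foldl (fun res l =>
      if (pvSumMap A B).contains (-(PySem.List.pyGetD C k 0 + PySem.List.pyGetD D l 0)) then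
        ((pvSumMap A B).getD (-(PySem.List.pyGetD C k 0 + PySem.List.pyGetD D l 0)) []).foldl
          (fun res p => res ++ [[p.1, p.2, PySem.List.pyGetD C k 0, PySem.List.pyGetD D l 0]]) res
      else res) res) []

-- ===== PORT B =====
-- Literal port of B: four nested index loops k, l, i, j.
def find_quadruples_four_arrays_alt (A : List Int) (B : List Int) (C : List Int) (D : List Int) : List (List Int) :=
  (PySem.List.pyRange 0 (A.length : Int) 1).foldl (fun res k =>
    (PySem.List.pyRange 0 (A.length : Int) 1).foldl (fun res l =>
      (PySem.List.pyRange 0 (A.length : Int) 1).foldl (fun res i =>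
        (PySem.List.pyRange 0 (A.length : Int) 1).foldl (fun res j =>
          if PySem.List.pyGetD A i 0 + PySem.List.pyGetD B j 0 + PySem.List.pyGetD C k 0 + PySem.List.pyGetD D l 0 == 0 then
            res ++ [[PySem.List.pyGetD A i 0, PySem.List.pyGetD B j 0, PySem.List.pyGetD C k 0, PySem.List.pyGetD D l 0]]
          else res) res) res) res) []

-- ===== PRECONDITION & SPEC =====
-- A indexes B, C and D by range(len(A)), so it raises IndexError whenever any of
-- them is shorter than A; Pre_ excludes exactly those ragged inputs.
def Pre_find_quadruples_four_arrays (A : List Int) (B : List Int) (C : List Int) (D : List Int) : Prop :=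
  A.length ≤ B.length ∧ A.length ≤ C.length ∧ A.length ≤ D.length
instance (A : List Int) (B : List Int) (C : List Int) (D : List Int) : Decidable (Pre_find_quadruples_four_arrays A B C D) := by unfold Pre_find_quadruples_four_arrays; infer_instance

def pvWitness_find_quadruples_four_arrays : List Int × List Int × List Int × List Int :=
  ([1, -1], [2, 0], [-1, 0], [0, -1])

def Spec_find_quadruples_four_arrays (A : List Int) (B : List Int) (C : List Int) (D : List Int) (out : List (List Int)) : Prop := out = find_quadruples_four_arrays_alt A B C D
instance (A : List Int) (B : List Int) (C : List Int) (D : List Int) (out : List (List Int)) : Decidable (Spec_find_quadruples_four_arrays A B C D out) := by unfold Spec_find_quadruples_four_arrays; infer_instance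

-- ===== CLAIM (what is proved, stated in full; the proofs are below) =====
def Claim_equal_find_quadruples_four_arrays : Prop := ∀ (A : List Int) (B : List Int) (C : List Int) (D : List Int), Dom_find_quadruples_four_arrays A B C D → Pre_find_quadruples_four_arrays A B C D → Spec_find_quadruples_four_arrays A B C D (find_quadruples_four_arrays A B C D)

-- ===== LEMMAS AND PROOFS =====

-- Two nested index loops are one fold over the list of index pairs.
theorem pvNest2 {α β γ : Type} (l1 : List α) (l2 : List β) (f : γ → α → β → γ) (init : γ) :
    l1.foldl (fun a i => l2.foldl (fun a j => f a i j) a) init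
      = (l1.flatMap (fun i => l2.map (fun j => (i, j)))).foldl (fun a q => f a q.1 q.2) init := by
  induction l1 generalizing init with
  | nil => rfl
  | cons x xs ih => simp [List.foldl_append, List.foldl_map, ih]

theorem find_quadruples_four_arrays_eq_alt (A B C D : List Int) :
    find_quadruples_four_arrays A B C D = find_quadruples_four_arrays_alt A B C D := by
  unfold find_quadruples_four_arrays find_quadruples_four_arrays_alt
  set R := PySem.List.pyRange 0 (A.length : Int) 1 with hR
  set IJ := R.flatMap (fun i => R.map (fun j => (i, j))) with hIJ
  -- the keyed list of A/B pairs, in (i, j) order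
  set L : List (Int × (Int × Int)) :=
    IJ.map (fun q => (PySem.List.pyGetD A q.1 0 + PySem.List.pyGetD B q.2 0,
                      (PySem.List.pyGetD A q.1 0, PySem.List.pyGetD B q.2 0))) with hL
  -- the built dict is the grouping fold over L
  have hbuild : pvSumMap A B = L.foldl (fun d p => d.modify p.1 [] (· ++ [p.2])) PySem.Dict.empty := by
    unfold pvSumMap
    rw [← hR, pvNest2, hL, List.foldl_map]
  have hgetD : ∀ t : Int,
      (pvSumMap A B).getD t [] = (L.filter (fun p => p.1 == t)).map (·.2) := by
    intro t
    rw [hbuild, PySem.Dict.getD_foldl_modify_append]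
    simp
  have hkeys : ∀ t : Int, (pvSumMap A B).contains t = false → t ∉ L.map (·.1) := by
    intro t hc hmem
    rw [hbuild, ← Bool.not_eq_true, PySem.Dict.contains_iff_mem_keys,
        PySem.Dict.keys_foldl_modify_key] at hc
    exact hc (by simp [PySem.Set.mem_update, PySem.Dict.keys_empty, hmem])
  -- the two outer double loops over (k, l) have pointwise-equal bodies
  rw [pvNest2 R R
    (f := fun res k l =>
      if (pvSumMap A B).contains (-(PySem.List.pyGetD C k 0 + PySem.List.pyGetD D l 0)) then
        ((pvSumMap A B).getD (-(PySem.List.pyGetD C k 0 + PySem.List.pyGetD D l 0)) []).foldl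
          (fun res p => res ++ [[p.1, p.2, PySem.List.pyGetD C k 0, PySem.List.pyGetD D l 0]]) res
      else res)]
  rw [pvNest2 R R
    (f := fun res k l =>
      R.foldl (fun res i =>
        R.foldl (fun res j =>
          if PySem.List.pyGetD A i 0 + PySem.List.pyGetD B j 0 + PySem.List.pyGetD C k 0 + PySem.List.pyGetD D l 0 == 0 then
            res ++ [[PySem.List.pyGetD A i 0, PySem.List.pyGetD B j 0, PySem.List.pyGetD C k 0, PySem.List.pyGetD D l 0]]
          else res) res) res)]
  apply PySem.List.foldl_congr_mem
  intro res q _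
  set ck := PySem.List.pyGetD C q.1 0 with hck
  set dl := PySem.List.pyGetD D q.2 0 with hdl
  -- B's inner double loop over (i, j), as one fold over L
  have hB0 :
      (IJ.foldl (fun (a : List (List Int)) (p : Int × Int) =>
        if PySem.List.pyGetD A p.1 0 + PySem.List.pyGetD B p.2 0 + ck + dl == 0 then
          a ++ [[PySem.List.pyGetD A p.1 0, PySem.List.pyGetD B p.2 0, ck, dl]]
        else a) res)
      = L.foldl (fun a p =>
          if p.1 + ck + dl == 0 then a ++ [[p.2.1, p.2.2, ck, dl]] else a) res := by
    rw [hL, List.foldl_map]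
  have hfilter : L.filter (fun p => p.1 == -(ck + dl)) = L.filter (fun p => p.1 + ck + dl == 0) := by
    apply List.filter_congr
    intro p _
    rw [Bool.eq_iff_iff]
    simp only [beq_iff_eq]
    omega
  rw [pvNest2 R R
    (f := fun res i j =>
      if PySem.List.pyGetD A i 0 + PySem.List.pyGetD B j 0 + ck + dl == 0 then
        res ++ [[PySem.List.pyGetD A i 0, PySem.List.pyGetD B j 0, ck, dl]]
      else res), ← hIJ, hB0, PySem.List.foldl_append_if]
  by_cases hc : (pvSumMap A B).contains (-(ck + dl)) = true
  · rw [if_pos hc, hgetD, PySem.List.foldl_append_singleton_eq_map, List.map_map, hfilter]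
    rfl
  · rw [Bool.not_eq_true] at hc
    have hnil : L.filter (fun p => p.1 + ck + dl == 0) = [] := by
      rw [← hfilter, List.filter_eq_nil_iff]
      intro p hp hbeq
      exact hkeys _ hc (by
        simp only [List.mem_map]
        exact ⟨p, hp, by simpa using hbeq⟩)
    rw [if_neg (by rw [hc]; exact Bool.false_ne_true), hnil]
    simp

-- ===== VERDICT (by name: the statement is the Claim_ definition above) =====
theorem find_quadruples_four_arrays_spec : Claim_equal_find_quadruples_four_arrays := by
  intro A B C D _ _
  unfold Spec_find_quadruples_four_arrays
  exact find_quadruples_four_arrays_eq_alt A B C D
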